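-- pv_equiv track=rewrite | github.com/styjii/exercise_univerity | base_n°3/base.py | _set_to_number
-- ===== SOURCE A (Python) =====
-- def _set_to_number(e:str) -> int:
--     """convert character to number
--
--     Args:
--         e (str): character to convert
--
--     Returns:
--         int: number for the character
--     """
--     characters = ['A', 'B', 'C', 'D', 'E', 'F']
--     numbers = [10, 11, 12, 13, 14, 15]
--     n = len(characters)
--
--     for i in range(n):
--         if e == characters[i]:
--             return numbers[i]
--     return -1
-- ===== SOURCE B (Python) =====
-- def _set_to_number(e: str) -> int:
--     """convert character to number (closed-form: range check + ord arithmetic)"""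
--     if len(e) == 1 and 'A' <= e <= 'F':
--         return ord(e) - 55
--     return -1
-- ===== Notes on version B (the rewrite author's own statement) =====
-- stated objective: simpler
-- what changed: Replaced the parallel-list linear scan with a closed-form character-code computation: a single-character A-F range guard plus ord(e)-55, no lists and no loop.
import Mathlib
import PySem

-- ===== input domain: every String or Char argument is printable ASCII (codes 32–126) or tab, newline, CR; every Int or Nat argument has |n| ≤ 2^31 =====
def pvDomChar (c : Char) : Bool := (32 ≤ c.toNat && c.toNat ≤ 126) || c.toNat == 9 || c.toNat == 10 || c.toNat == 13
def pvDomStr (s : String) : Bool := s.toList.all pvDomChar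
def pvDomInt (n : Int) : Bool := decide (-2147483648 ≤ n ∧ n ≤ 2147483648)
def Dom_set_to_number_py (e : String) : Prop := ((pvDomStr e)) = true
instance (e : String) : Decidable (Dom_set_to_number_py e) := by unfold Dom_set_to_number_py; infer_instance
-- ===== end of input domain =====

-- B replaces A's parallel-list scan by a closed-form single-char A–F range check and code arithmetic (simpler).

-- ===== PORT A =====
-- loop 'for i in range(n): if e == characters[i]: return numbers[i]' over the zipped tables
def setToNumberScan (table : List (String × Int)) (e : String) : Int :=
  match table with
  | [] => -1
  | (c, n) :: rest => if e = c then n else setToNumberScan rest e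

def set_to_number_py (e : String) : Int :=
  setToNumberScan [("A", 10), ("B", 11), ("C", 12), ("D", 13), ("E", 14), ("F", 15)] e

-- ===== PORT B =====
def set_to_number_py_alt (e : String) : Int :=
  match e.toList with
  | [c] => if 'A' ≤ c ∧ c ≤ 'F' then (c.toNat : Int) - 55 else -1
  | _ => -1

-- ===== PRECONDITION & SPEC =====
def Spec_set_to_number_py (e : String) (out : Int) : Prop := out = set_to_number_py_alt e
instance (e : String) (out : Int) : Decidable (Spec_set_to_number_py e out) := by unfold Spec_set_to_number_py; infer_instance

-- ===== CLAIM (what is proved, stated in full; the proofs are below) =====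
def Claim_equal_set_to_number_py : Prop := ∀ (e : String), Dom_set_to_number_py e → Spec_set_to_number_py e (set_to_number_py e)

-- ===== LEMMAS AND PROOFS =====
theorem str_eq_iff_toList (e s : String) : (e = s) ↔ e.toList = s.toList := by
  constructor
  · intro h; rw [h]
  · intro h; exact String.ext (by simpa using h)

-- ===== VERDICT (by name: the statement is the Claim_ definition above) =====
theorem set_to_number_py_spec : Claim_equal_set_to_number_py := by
  intro e _
  unfold Spec_set_to_number_py set_to_number_py set_to_number_py_alt
  simp only [setToNumberScan, str_eq_iff_toList]
  match h : e.toList with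
  | [] => simp only [h]; decide
  | [c] =>
    have hA : ([c] = "A".toList) ↔ c = 'A' := by constructor <;> simp_all
    have hB : ([c] = "B".toList) ↔ c = 'B' := by constructor <;> simp_all
    have hC : ([c] = "C".toList) ↔ c = 'C' := by constructor <;> simp_all
    have hD : ([c] = "D".toList) ↔ c = 'D' := by constructor <;> simp_all
    have hE : ([c] = "E".toList) ↔ c = 'E' := by constructor <;> simp_all
    have hF : ([c] = "F".toList) ↔ c = 'F' := by constructor <;> simp_all
    simp only [hA, hB, hC, hD, hE, hF]
    by_cases h1 : c = 'A'; · subst h1; decide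
    by_cases h2 : c = 'B'; · subst h2; decide
    by_cases h3 : c = 'C'; · subst h3; decide
    by_cases h4 : c = 'D'; · subst h4; decide
    by_cases h5 : c = 'E'; · subst h5; decide
    by_cases h6 : c = 'F'; · subst h6; decide
    simp only [h1, h2, h3, h4, h5, h6, if_false]
    rw [if_neg]
    rintro ⟨hle1, hle2⟩
    have charEq : ∀ (d : Char), c.toNat = d.toNat → c = d := fun d hh =>
      Char.ext (UInt32.toNat_inj.mp hh)
    have a1 := UInt32.le_iff_toNat_le.mp (Char.le_def.mp hle1)
    have a2 := UInt32.le_iff_toNat_le.mp (Char.le_def.mp hle2)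
    have b1 : ('A' : Char).val.toNat = 65 := by decide
    have b2 : ('F' : Char).val.toNat = 70 := by decide
    rw [b1] at a1; rw [b2] at a2
    have vA : ('A' : Char).toNat = 65 := by decide
    have vB : ('B' : Char).toNat = 66 := by decide
    have vC : ('C' : Char).toNat = 67 := by decide
    have vD : ('D' : Char).toNat = 68 := by decide
    have vE : ('E' : Char).toNat = 69 := by decide
    have vF : ('F' : Char).toNat = 70 := by decide
    have e1 : c.toNat ≠ 65 := fun hh => h1 (charEq 'A' (by rw [hh, vA]))
    have e2 : c.toNat ≠ 66 := fun hh => h2 (charEq 'B' (by rw [hh, vB]))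
    have e3 : c.toNat ≠ 67 := fun hh => h3 (charEq 'C' (by rw [hh, vC]))
    have e4 : c.toNat ≠ 68 := fun hh => h4 (charEq 'D' (by rw [hh, vD]))
    have e5 : c.toNat ≠ 69 := fun hh => h5 (charEq 'E' (by rw [hh, vE]))
    have e6 : c.toNat ≠ 70 := fun hh => h6 (charEq 'F' (by rw [hh, vF]))
    have hv : c.toNat = c.val.toNat := rfl
    rw [hv] at e1 e2 e3 e4 e5 e6
    omega
  | c :: d :: rest => simp
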